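-- pv_equiv track=rewrite | github.com/japarker02446/BUProjects | CS521 Data Structures with Python/Homework5/japarker_hw_5_2.py | string_count_histogram
-- ===== SOURCE A (Python) =====
-- import string
--
-- LETTERS = string.ascii_uppercase
--
-- def letter_counts(input_str:str) -> dict:
--     """
--     Take a string as input.  Count and return the frequency of each letter as
--     a dictionary.
--
--     Parameters
--     ----------
--     input_str : str
--         A string.
--     Returns
--     -------
--     dict
--         A dictionary object with the letters of input_str as keys and the count
--         of each component letter as a value.
--     """
--     # Initialize function variables.
--     letter_count_dict = dict()
--
--     for char in input_str:
--         if char.upper() in LETTERS: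
--             if char.upper() in letter_count_dict:
--                 letter_count_dict[char.upper()] += 1
--             else:
--                 letter_count_dict[char.upper()] = 1
--     # End for char in input_str
--
--     return letter_count_dict
--
-- def string_count_histogram(input_str:str) -> str:
--     """
--     Use the letter_counts function to count the instance of letters in a string.
--     Print the count of letters in the input string as a histogram with the
--         letters in alphabetical order.
--
--     Parameters
--     ----------
--     input_str : str
--         A string.
--
--     Returns
--     -------
--     str
--         A string histogram of letter counts.
--     """
--     # Initalize function variables.
--     letter_count_dict = letter_counts(input_str)
--     histogram_str = ""
--
--     # For each key (letter) print the letter value number of times on one line.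
--     for keys in sorted(letter_count_dict.keys()):
--         for i in range(0,letter_count_dict[keys]):
--             histogram_str += keys
--         histogram_str += "\n"
--     return histogram_str
-- ===== SOURCE B (Python) =====
-- import string
--
-- LETTERS = string.ascii_uppercase
--
-- def string_count_histogram(input_str: str) -> str:
--     # No counting dict and no sort: LETTERS is already A-Z in order, so scan
--     # the input once per letter and emit that letter's line directly.
--     parts = []
--     for letter in LETTERS:
--         count = sum(1 for c in input_str if c.upper() == letter)
--         if count:
--             parts.append(letter * count + "\n")
--     return "".join(parts)
-- ===== Notes on version B (the rewrite author's own statement) =====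
-- stated objective: simpler
-- what changed: Replaces the build-a-counting-dict-then-sort-its-keys pipeline by a direct loop over the already-alphabetical LETTERS constant that recounts the input per letter and emits each nonempty line immediately.
import Mathlib
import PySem

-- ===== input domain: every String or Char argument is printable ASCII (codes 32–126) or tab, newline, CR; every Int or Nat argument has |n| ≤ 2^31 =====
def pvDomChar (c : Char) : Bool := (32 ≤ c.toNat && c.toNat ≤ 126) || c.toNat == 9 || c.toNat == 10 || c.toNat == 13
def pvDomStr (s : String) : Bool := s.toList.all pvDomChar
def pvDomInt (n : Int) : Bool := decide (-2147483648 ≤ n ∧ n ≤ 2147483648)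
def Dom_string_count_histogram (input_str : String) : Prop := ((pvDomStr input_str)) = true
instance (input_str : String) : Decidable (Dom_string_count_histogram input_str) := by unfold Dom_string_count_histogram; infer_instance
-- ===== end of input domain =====

-- A builds a letter→count dict and sorts its keys; B loops over the already-alphabetical
-- LETTERS constant, recounting the input per letter — simpler (no dict, no sort), same values.


-- ===== PORT A =====
-- string.ascii_uppercase
def pvLETTERS : List Char := "ABCDEFGHIJKLMNOPQRSTUVWXYZ".toList

-- char.upper() on a single character; hand port, exact on the stated domain
-- (printable ASCII plus tab/newline/CR, where upper() maps a-z to A-Z and fixes everything else).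
def pvUpperChar (c : Char) : Char :=
  if 'a' ≤ c ∧ c ≤ 'z' then Char.ofNat (c.toNat - 32) else c

-- letter_counts: 'char.upper() in LETTERS' is single-char membership in an ASCII string,
-- ported as list membership (exact on the single-char domain).
def pvLetterCounts (input_str : String) : PySem.Dict Char Int :=
  input_str.toList.foldl
    (fun d ch =>
      let u := pvUpperChar ch
      if pvLETTERS.contains u then
        if d.contains u then d.insert u (d.getD u 0 + 1)
        else d.insert u 1
      else d)
    PySem.Dict.empty

def string_count_histogram (input_str : String) : String :=
  let d := pvLetterCounts input_str
  let hist := (PySem.List.sorted d.keys (fun k => k)).foldl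
    (fun acc k =>
      ((PySem.List.pyRange 0 (d.getD k 0) 1).foldl (fun acc2 _ => acc2 ++ [k]) acc) ++ ['\n'])
    []
  String.ofList hist

-- ===== PORT B =====
-- sum(1 for c in input_str if c.upper() == letter) is a 0/1-sum = List.countP;
-- letter * count is List.replicate; "".join(parts) is flatten.
def string_count_histogram_alt (input_str : String) : String :=
  let parts := pvLETTERS.foldl
    (fun parts letter =>
      let count := input_str.toList.countP (fun c => pvUpperChar c == letter)
      if count ≠ 0 then parts ++ [List.replicate count letter ++ ['\n']] else parts)
    []
  String.ofList parts.flatten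

-- ===== PRECONDITION & SPEC =====
def Spec_string_count_histogram (input_str : String) (out : String) : Prop := out = string_count_histogram_alt input_str
instance (input_str : String) (out : String) : Decidable (Spec_string_count_histogram input_str out) := by unfold Spec_string_count_histogram; infer_instance

-- ===== CLAIM (what is proved, stated in full; the proofs are below) =====
def Claim_equal_string_count_histogram : Prop := ∀ (input_str : String), Dom_string_count_histogram input_str → Spec_string_count_histogram input_str (string_count_histogram input_str)

-- ===== LEMMAS AND PROOFS =====

-- the count of characters of cs whose upper() is L
def pvCnt (cs : List Char) (L : Char) : Nat := cs.countP (fun c => pvUpperChar c == L)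

-- the step function of A's counting loop
def pvStep (d : PySem.Dict Char Int) (ch : Char) : PySem.Dict Char Int :=
  let u := pvUpperChar ch
  if pvLETTERS.contains u then
    if d.contains u then d.insert u (d.getD u 0 + 1)
    else d.insert u 1
  else d

theorem pvLetterCounts_eq (s : String) :
    pvLetterCounts s = s.toList.foldl pvStep PySem.Dict.empty := rfl

theorem pvStep_getD (d : PySem.Dict Char Int) (ch L : Char) (hL : pvLETTERS.contains L = true) :
    (pvStep d ch).getD L 0 = d.getD L 0 + (if pvUpperChar ch == L then 1 else 0) := by
  unfold pvStep
  by_cases hu : pvUpperChar ch = L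
  · subst hu
    rw [if_pos hL]
    by_cases hc : d.contains (pvUpperChar ch) = true
    · rw [if_pos hc, PySem.Dict.getD_insert]; simp
    · have hc' : d.contains (pvUpperChar ch) = false := by simpa using hc
      rw [if_neg (by simp [hc']), PySem.Dict.getD_insert,
          PySem.Dict.getD_of_not_contains d 0 hc']
      simp
  · have hne : ¬ L = pvUpperChar ch := fun h => hu h.symm
    by_cases hg : pvLETTERS.contains (pvUpperChar ch) = true
    · rw [if_pos hg]
      split <;> rw [PySem.Dict.getD_insert, if_neg hne] <;> simp [hu]
    · rw [if_neg hg]; simp [hu]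

theorem pvFold_getD (cs : List Char) (d : PySem.Dict Char Int) (L : Char)
    (hL : pvLETTERS.contains L = true) :
    (cs.foldl pvStep d).getD L 0 = d.getD L 0 + (pvCnt cs L : Int) := by
  induction cs generalizing d with
  | nil => simp [pvCnt]
  | cons ch cs ih =>
      rw [List.foldl_cons, ih, pvStep_getD d ch L hL]
      unfold pvCnt
      by_cases h : pvUpperChar ch = L
      · simp [h]; ring
      · simp [h]

theorem pvStep_mem_keys (d : PySem.Dict Char Int) (ch L : Char) :
    L ∈ (pvStep d ch).keys ↔ L ∈ d.keys ∨ (L ∈ pvLETTERS ∧ pvUpperChar ch = L) := by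
  unfold pvStep
  by_cases hg : pvLETTERS.contains (pvUpperChar ch)
  · have hmem : pvUpperChar ch ∈ pvLETTERS := by simpa using hg
    simp only [hg, if_true]
    constructor
    · intro h
      rcases (by split at h <;> [skip; skip] <;>
        exact (PySem.Dict.mem_keys_insert _ _ _ _).1 h : L = pvUpperChar ch ∨ L ∈ d.keys) with h1 | h1
      · exact Or.inr ⟨h1 ▸ hmem, h1.symm⟩
      · exact Or.inl h1
    · intro h
      rcases h with h1 | ⟨_, h2⟩
      · split <;> exact (PySem.Dict.mem_keys_insert _ _ _ _).2 (Or.inr h1)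
      · split <;> exact (PySem.Dict.mem_keys_insert _ _ _ _).2 (Or.inl h2.symm)
  · have hmem : pvUpperChar ch ∉ pvLETTERS := by simpa using hg
    simp only [hg, Bool.false_eq_true, if_false]
    constructor
    · exact Or.inl
    · rintro (h1 | ⟨h2, h3⟩)
      · exact h1
      · exact absurd (h3 ▸ h2) hmem

theorem pvFold_mem_keys (cs : List Char) (d : PySem.Dict Char Int) (L : Char) :
    L ∈ (cs.foldl pvStep d).keys ↔ L ∈ d.keys ∨ (L ∈ pvLETTERS ∧ pvCnt cs L ≠ 0) := by
  induction cs generalizing d with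
  | nil => simp [pvCnt]
  | cons ch cs ih =>
      rw [List.foldl_cons, ih, pvStep_mem_keys]
      unfold pvCnt
      by_cases h : pvUpperChar ch = L
      · simp [h]; tauto
      · simp [h]

theorem pvFold_nodup (cs : List Char) (d : PySem.Dict Char Int) (hd : d.keys.Nodup) :
    (cs.foldl pvStep d).keys.Nodup := by
  induction cs generalizing d with
  | nil => exact hd
  | cons ch cs ih =>
      rw [List.foldl_cons]
      apply ih
      unfold pvStep
      dsimp only
      split
      · split <;> exact PySem.Dict.nodup_keys_insert _ _ _ hd
      · exact hd

theorem pvLETTERS_pairwise : pvLETTERS.Pairwise (· ≤ ·) := by decide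

theorem pvLETTERS_nodup : pvLETTERS.Nodup := by decide

-- A's sorted key list IS the filtered alphabet
theorem pvSorted_keys (cs : List Char) :
    PySem.List.sorted (cs.foldl pvStep PySem.Dict.empty).keys (fun k => k)
      = pvLETTERS.filter (fun L => pvCnt cs L ≠ 0) := by
  apply PySem.List.sorted_id_eq_of_perm_of_pairwise
  · rw [List.perm_ext_iff_of_nodup (List.Nodup.filter _ pvLETTERS_nodup)
      (pvFold_nodup cs PySem.Dict.empty PySem.Dict.nodup_keys_empty)]
    intro L
    rw [pvFold_mem_keys, List.mem_filter]
    simp [PySem.Dict.keys_empty]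
  · exact List.Pairwise.filter _ pvLETTERS_pairwise

theorem pvInner_loop (n : Nat) (k : Char) (acc : List Char) :
    (PySem.List.pyRange 0 (n : Int) 1).foldl (fun acc2 _ => acc2 ++ [k]) acc
      = acc ++ List.replicate n k := by
  rw [PySem.List.pyRange_zero_natCast,
      PySem.List.foldl_append_singleton_eq_map (fun _ => k)]
  simp [Function.comp_def, List.map_const']

theorem string_count_histogram_spec : Claim_equal_string_count_histogram := by
  intro s _
  unfold Spec_string_count_histogram string_count_histogram string_count_histogram_alt
  dsimp only
  have hB := PySem.List.foldl_append_if
      (fun L => decide (List.countP (fun c => pvUpperChar c == L) s.toList ≠ 0))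
      (fun L => List.replicate (List.countP (fun c => pvUpperChar c == L) s.toList) L ++ ['\n'])
      pvLETTERS []
  simp only [decide_eq_true_eq] at hB
  rw [pvLetterCounts_eq, pvSorted_keys s.toList, hB]
  have hbody : ∀ (acc : List Char), ∀ L ∈ pvLETTERS.filter (fun L => pvCnt s.toList L ≠ 0),
      ((PySem.List.pyRange 0 ((s.toList.foldl pvStep PySem.Dict.empty).getD L 0)).foldl
          (fun acc2 _ => acc2 ++ [L]) acc) ++ ['\n']
        = acc ++ (List.replicate (pvCnt s.toList L) L ++ ['\n']) := by
    intro acc L hL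
    rw [List.mem_filter] at hL
    have hLc : pvLETTERS.contains L = true := by simpa using hL.1
    rw [pvFold_getD s.toList PySem.Dict.empty L hLc]
    simp only [PySem.Dict.getD_empty, zero_add]
    rw [pvInner_loop, List.append_assoc]
  rw [PySem.List.foldl_congr_mem _ _ _ _ hbody,
      PySem.List.foldl_append_eq_flatMap
        (fun L => List.replicate (pvCnt s.toList L) L ++ ['\n'])]
  rw [List.nil_append, List.nil_append, List.flatMap_def]
  unfold pvCnt
  rfl
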